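-- pv_equiv track=rewrite | github.com/Devi2806/email-spoofing-checker | spoof_checker_app.py | parse_dmarc_fields
-- ===== SOURCE A (Python) =====
-- def parse_dmarc_fields(dmarc_record):
--     result = {"p": "N/A", "rua": "N/A", "aspf": "N/A", "adkim": "N/A"}
--     try:
--         fields = dmarc_record.split(";")
--         for field in fields:
--             field = field.strip()
--             if field.startswith("p="):
--                 result["p"] = field.split("=")[1]
--             elif field.startswith("rua="):
--                 result["rua"] = field.split("=")[1]
--             elif field.startswith("aspf="):
--                 result["aspf"] = field.split("=")[1]
--             elif field.startswith("adkim="):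
--                 result["adkim"] = field.split("=")[1]
--     except:
--         pass
--     return result
-- ===== SOURCE B (Python) =====
-- def parse_dmarc_fields(dmarc_record):
--     keys = ["p", "rua", "aspf", "adkim"]
--     table = {}
--     try:
--         for field in dmarc_record.split(";"):
--             parts = field.strip().split("=")
--             if len(parts) >= 2:
--                 table[parts[0]] = parts[1]
--     except:
--         table = {}
--     return {k: table.get(k, "N/A") for k in keys}
-- ===== Notes on version B (the rewrite author's own statement) =====
-- stated objective: simpler
-- what changed: B replaces A's per-key startswith/elif branch chain by two passes: a generic pass over the semicolon-separated fields that splits each stripped field on the equals sign and stores first-part -> second-part into a table (last duplicate wins), then a lookup pass over the fixed four-key list filling the default marker for missing keys.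
import Mathlib
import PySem

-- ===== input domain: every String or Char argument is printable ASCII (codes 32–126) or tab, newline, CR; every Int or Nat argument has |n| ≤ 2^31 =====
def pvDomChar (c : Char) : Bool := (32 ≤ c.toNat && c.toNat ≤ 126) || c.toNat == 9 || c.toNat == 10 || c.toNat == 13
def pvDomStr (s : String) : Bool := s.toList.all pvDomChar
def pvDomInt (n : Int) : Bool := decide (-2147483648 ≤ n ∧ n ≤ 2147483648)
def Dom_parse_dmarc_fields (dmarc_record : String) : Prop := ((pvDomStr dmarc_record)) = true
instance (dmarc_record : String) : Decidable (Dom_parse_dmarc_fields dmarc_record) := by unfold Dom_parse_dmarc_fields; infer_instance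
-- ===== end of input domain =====

-- B replaces A's per-key startswith branch chain by one generic field pass building a
-- table (last duplicate wins) followed by a lookup pass over the fixed key list (simpler).
-- A's bare 'except: pass' is unreachable for a str argument, so both ports are total on String.

-- shared primitive: Python's s.split(sep) for a nonempty literal sep (split? is some there)
def pySplitBy (s sep : String) : List String := (PySem.Str.split? s sep).getD []

-- ===== PORT A =====
def parse_dmarc_fields (dmarc_record : String) : List (String × String) :=
  let init : PySem.Dict String String :=
    PySem.Dict.mk [("p", "N/A"), ("rua", "N/A"), ("aspf", "N/A"), ("adkim", "N/A")]
  let fields := pySplitBy dmarc_record ";"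
  (fields.foldl (fun d field =>
    let f := PySem.Str.strip field
    if PySem.Str.startswith f "p=" then d.insert "p" ((pySplitBy f "=").getD 1 "")
    else if PySem.Str.startswith f "rua=" then d.insert "rua" ((pySplitBy f "=").getD 1 "")
    else if PySem.Str.startswith f "aspf=" then d.insert "aspf" ((pySplitBy f "=").getD 1 "")
    else if PySem.Str.startswith f "adkim=" then d.insert "adkim" ((pySplitBy f "=").getD 1 "")
    else d) init).items

-- ===== PORT B =====
def pvKeys : List String := ["p", "rua", "aspf", "adkim"]

def parse_dmarc_fields_alt (dmarc_record : String) : List (String × String) :=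
  let table := (pySplitBy dmarc_record ";").foldl (fun t field =>
    let parts := pySplitBy (PySem.Str.strip field) "="
    if 2 ≤ parts.length then t.insert (parts.getD 0 "") (parts.getD 1 "") else t)
    (PySem.Dict.empty : PySem.Dict String String)
  pvKeys.map (fun k => (k, table.getD k "N/A"))

-- ===== PRECONDITION & SPEC =====
def Spec_parse_dmarc_fields (dmarc_record : String) (out : List (String × String)) : Prop := out = parse_dmarc_fields_alt dmarc_record
instance (dmarc_record : String) (out : List (String × String)) : Decidable (Spec_parse_dmarc_fields dmarc_record out) := by unfold Spec_parse_dmarc_fields; infer_instance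

-- ===== CLAIM (what is proved, stated in full; the proofs are below) =====
def Claim_equal_parse_dmarc_fields : Prop := ∀ (dmarc_record : String), Dom_parse_dmarc_fields dmarc_record → Spec_parse_dmarc_fields dmarc_record (parse_dmarc_fields dmarc_record)

-- ===== LEMMAS AND PROOFS =====

-- structural version of split on the single separator '='
def mysplit : List Char → List (List Char)
  | [] => [[]]
  | c :: r => if c = '=' then [] :: mysplit r
      else (c :: (mysplit r).headI) :: (mysplit r).tail

lemma mysplit_ne (s : List Char) : mysplit s ≠ [] := by
  cases s with
  | nil => simp [mysplit]
  | cons c r => by_cases h : c = '=' <;> simp [mysplit, h]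

lemma mysplit_head_tail (s : List Char) :
    (mysplit s).headI :: (mysplit s).tail = mysplit s := by
  cases h : mysplit s with
  | nil => exact absurd h (mysplit_ne s)
  | cons a t => simp

lemma mysplit_len_pos (s : List Char) : 1 ≤ (mysplit s).length := by
  have := mysplit_ne s
  cases h : mysplit s with
  | nil => exact absurd h this
  | cons a t => simp

lemma mysplit_cons_ne (c : Char) (r : List Char) (hc : c ≠ '=') :
    mysplit (c :: r) = (c :: (mysplit r).headI) :: (mysplit r).tail := by
  simp [mysplit, hc]

lemma go_spec (fuel : Nat) (l cur : List Char) (acc : List (List Char))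
    (h : l.length ≤ fuel) :
    PySem.Chars.splitOn.go ['='] fuel l cur acc =
      acc.reverse ++ (cur.reverse ++ (mysplit l).headI) :: (mysplit l).tail := by
  induction fuel generalizing l cur acc with
  | zero =>
    obtain rfl : l = [] := List.eq_nil_of_length_eq_zero (Nat.le_zero.mp h)
    simp [PySem.Chars.splitOn.go, mysplit]
  | succ n ih =>
    cases l with
    | nil => simp [PySem.Chars.splitOn.go, mysplit]
    | cons c rest =>
      by_cases hc : c = '='
      · subst hc
        have hp : (['='].isPrefixOf ('=' :: rest)) = true := by simp [List.isPrefixOf]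
        rw [PySem.Chars.splitOn.go]
        rw [if_pos hp]
        simp only [List.length_singleton, List.drop_succ_cons, List.drop_zero]
        rw [ih rest [] (cur.reverse :: acc) (by simpa using h)]
        simp [mysplit, mysplit_head_tail]
      · have hp : (['='].isPrefixOf (c :: rest)) = false := by
          simp [List.isPrefixOf]
          exact fun h => absurd h.symm hc
        rw [PySem.Chars.splitOn.go]
        simp only [hp, Bool.false_eq_true, if_false]
        rw [ih rest (c :: cur) acc (by simpa using h)]
        simp [mysplit, hc]

lemma splitOn_eq_mysplit (s : List Char) :
    PySem.Chars.splitOn s ['='] = mysplit s := by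
  rw [PySem.Chars.splitOn, go_spec _ _ _ _ (by omega)]
  simp [mysplit_head_tail]

-- startswith "k=" (k free of '=') ↔ split has ≥ 2 parts and its head is k
lemma startswith_iff_mysplit (s k : List Char) (hk : '=' ∉ k) :
    PySem.Chars.startswith s (k ++ ['=']) = true ↔
      2 ≤ (mysplit s).length ∧ (mysplit s).headI = k := by
  induction s generalizing k with
  | nil =>
    cases k <;> simp [PySem.Chars.startswith, mysplit]
  | cons c r ih =>
    by_cases hc : c = '='
    · subst hc
      cases k with
      | nil =>
        have := mysplit_len_pos r
        simp [PySem.Chars.startswith, mysplit, List.isPrefixOf]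
        omega
      | cons k0 k' =>
        have hk0 : ('=' : Char) ≠ k0 := fun h => hk (by simp [← h])
        simp [PySem.Chars.startswith, mysplit, List.isPrefixOf]
        exact fun h => absurd h.symm hk0
    · cases k with
      | nil =>
        simp [PySem.Chars.startswith, List.isPrefixOf, mysplit_cons_ne c r hc]
        exact fun h => hc h.symm
      | cons k0 k' =>
        have hk' : '=' ∉ k' := fun h => hk (by simp [h])
        by_cases hck : k0 = c
        · subst hck
          have hIH := ih k' hk'
          simp only [PySem.Chars.startswith, List.cons_append, List.isPrefixOf,
            beq_self_eq_true, Bool.true_and] at hIH ⊢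
          rw [hIH, mysplit_cons_ne k0 r hc]
          have hl : (mysplit r).length = (mysplit r).tail.length + 1 := by
            conv_lhs => rw [← mysplit_head_tail r]
            simp
          simp only [List.length_cons, List.headI_cons, List.cons.injEq, true_and]
          constructor
          · rintro ⟨h2, hh⟩
            exact ⟨by omega, hh⟩
          · rintro ⟨h2, hh⟩
            exact ⟨by omega, hh⟩
        · have hb : (k0 == c) = false := beq_eq_false_iff_ne.mpr hck
          simp only [PySem.Chars.startswith, List.cons_append, List.isPrefixOf, hb,
            Bool.false_and, Bool.false_eq_true, false_iff, mysplit_cons_ne c r hc,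
            List.headI_cons, not_and]
          intro _ hh
          exact hck (((List.cons.injEq _ _ _ _).mp hh).1).symm

-- bridge: the ports' field step, seen on char lists
lemma pySplitBy_eq (f : String) :
    pySplitBy f "=" = (mysplit f.toList).map String.ofList := by
  simp [pySplitBy, PySem.Str.split?, PySem.Chars.split?, splitOn_eq_mysplit]

def dictOf (t : PySem.Dict String String) : PySem.Dict String String :=
  PySem.Dict.mk (pvKeys.map (fun k => (k, t.getD k "N/A")))

def stepA (d : PySem.Dict String String) (field : String) : PySem.Dict String String :=
  if PySem.Str.startswith (PySem.Str.strip field) "p=" then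
    d.insert "p" ((pySplitBy (PySem.Str.strip field) "=").getD 1 "")
  else if PySem.Str.startswith (PySem.Str.strip field) "rua=" then
    d.insert "rua" ((pySplitBy (PySem.Str.strip field) "=").getD 1 "")
  else if PySem.Str.startswith (PySem.Str.strip field) "aspf=" then
    d.insert "aspf" ((pySplitBy (PySem.Str.strip field) "=").getD 1 "")
  else if PySem.Str.startswith (PySem.Str.strip field) "adkim=" then
    d.insert "adkim" ((pySplitBy (PySem.Str.strip field) "=").getD 1 "")
  else d

def stepB (t : PySem.Dict String String) (field : String) : PySem.Dict String String :=
  if 2 ≤ (pySplitBy (PySem.Str.strip field) "=").length then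
    t.insert ((pySplitBy (PySem.Str.strip field) "=").getD 0 "")
      ((pySplitBy (PySem.Str.strip field) "=").getD 1 "")
  else t

lemma dictOf_insert (t : PySem.Dict String String) (k v : String) (hk : k ∈ pvKeys) :
    dictOf (t.insert k v) = (dictOf t).insert k v := by
  fin_cases hk <;>
  · apply PySem.Dict.ext
    simp only [dictOf, pvKeys, List.map_cons, List.map_nil, PySem.Dict.getD_insert]
    norm_num
    simp [PySem.Dict.insert, PySem.Dict.contains]

lemma dictOf_insert_foreign (t : PySem.Dict String String) (k v : String) (hk : k ∉ pvKeys) :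
    dictOf (t.insert k v) = dictOf t := by
  have h1 : ¬("p" = k) := fun h => hk (by simp [pvKeys, ← h])
  have h2 : ¬("rua" = k) := fun h => hk (by simp [pvKeys, ← h])
  have h3 : ¬("aspf" = k) := fun h => hk (by simp [pvKeys, ← h])
  have h4 : ¬("adkim" = k) := fun h => hk (by simp [pvKeys, ← h])
  simp [dictOf, pvKeys, PySem.Dict.getD_insert, h1, h2, h3, h4]

lemma ofList_notin_pvKeys (h0 : List Char) (h1 : h0 ≠ ['p']) (h2 : h0 ≠ ['r','u','a'])
    (h3 : h0 ≠ ['a','s','p','f']) (h4 : h0 ≠ ['a','d','k','i','m']) :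
    String.ofList h0 ∉ pvKeys := by
  intro hmem
  simp only [pvKeys, List.mem_cons, List.not_mem_nil, or_false] at hmem
  rcases hmem with h | h | h | h <;>
    [exact h1 (by simpa using congrArg String.toList h);
     exact h2 (by simpa using congrArg String.toList h);
     exact h3 (by simpa using congrArg String.toList h);
     exact h4 (by simpa using congrArg String.toList h)]

lemma step_comm (t : PySem.Dict String String) (field : String) :
    stepA (dictOf t) field = dictOf (stepB t field) := by
  unfold stepA stepB
  generalize PySem.Str.strip field = f
  have hswp : PySem.Str.startswith f "p=" = true ↔
      2 ≤ (mysplit f.toList).length ∧ (mysplit f.toList).headI = ['p'] := by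
    have h : ("p=").toList = ['p'] ++ ['='] := rfl
    simpa [PySem.Str.startswith, h] using startswith_iff_mysplit f.toList ['p'] (by decide)
  have hswr : PySem.Str.startswith f "rua=" = true ↔
      2 ≤ (mysplit f.toList).length ∧ (mysplit f.toList).headI = ['r','u','a'] := by
    have h : ("rua=").toList = ['r','u','a'] ++ ['='] := rfl
    simpa [PySem.Str.startswith, h] using startswith_iff_mysplit f.toList ['r','u','a'] (by decide)
  have hswa : PySem.Str.startswith f "aspf=" = true ↔
      2 ≤ (mysplit f.toList).length ∧ (mysplit f.toList).headI = ['a','s','p','f'] := by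
    have h : ("aspf=").toList = ['a','s','p','f'] ++ ['='] := rfl
    simpa [PySem.Str.startswith, h] using startswith_iff_mysplit f.toList ['a','s','p','f'] (by decide)
  have hswd : PySem.Str.startswith f "adkim=" = true ↔
      2 ≤ (mysplit f.toList).length ∧ (mysplit f.toList).headI = ['a','d','k','i','m'] := by
    have h : ("adkim=").toList = ['a','d','k','i','m'] ++ ['='] := rfl
    simpa [PySem.Str.startswith, h] using startswith_iff_mysplit f.toList ['a','d','k','i','m'] (by decide)
  have hparts := pySplitBy_eq f
  obtain ⟨h0, tl, hms⟩ : ∃ h0 tl, mysplit f.toList = h0 :: tl := by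
    cases h : mysplit f.toList with
    | nil => exact absurd h (mysplit_ne _)
    | cons a b => exact ⟨a, b, rfl⟩
  cases tl with
  | nil =>
    have hlen : ¬ 2 ≤ (mysplit f.toList).length := by rw [hms]; simp
    have e1 : PySem.Str.startswith f "p=" = false :=
      Bool.eq_false_iff.mpr (fun h => hlen (hswp.mp h).1)
    have e2 : PySem.Str.startswith f "rua=" = false :=
      Bool.eq_false_iff.mpr (fun h => hlen (hswr.mp h).1)
    have e3 : PySem.Str.startswith f "aspf=" = false :=
      Bool.eq_false_iff.mpr (fun h => hlen (hswa.mp h).1)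
    have e4 : PySem.Str.startswith f "adkim=" = false :=
      Bool.eq_false_iff.mpr (fun h => hlen (hswd.mp h).1)
    rw [e1, e2, e3, e4, hparts, hms]
    simp
  | cons v tl' =>
    have hlen : 2 ≤ (mysplit f.toList).length := by rw [hms]; simp
    by_cases hp : h0 = ['p']
    · have sp : PySem.Str.startswith f "p=" = true :=
        hswp.mpr ⟨hlen, by rw [hms]; simpa using hp⟩
      rw [sp, hparts, hms, hp]
      have hk : String.ofList ['p'] = "p" := by decide
      simp only [if_pos, List.map_cons, List.length_cons, List.getD, List.getElem?_cons_zero,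
        List.getElem?_cons_succ, Option.getD_some, hk]
      rw [if_pos (by omega)]
      rw [dictOf_insert t "p" _ (by simp [pvKeys])]
    · by_cases hr : h0 = ['r','u','a']
      · have e1 : PySem.Str.startswith f "p=" = false :=
          Bool.eq_false_iff.mpr (fun h => hp (by have := (hswp.mp h).2; rw [hms] at this; simpa using this))
        have sr : PySem.Str.startswith f "rua=" = true :=
          hswr.mpr ⟨hlen, by rw [hms]; simpa using hr⟩
        rw [e1, sr, hparts, hms, hr]
        have hk : String.ofList ['r','u','a'] = "rua" := by decide
        simp only [Bool.false_eq_true, if_false, if_pos, List.map_cons, List.length_cons,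
          List.getD, List.getElem?_cons_zero, List.getElem?_cons_succ, Option.getD_some, hk]
        rw [if_pos (by omega)]
        rw [dictOf_insert t "rua" _ (by simp [pvKeys])]
      · by_cases ha : h0 = ['a','s','p','f']
        · have e1 : PySem.Str.startswith f "p=" = false :=
            Bool.eq_false_iff.mpr (fun h => hp (by have := (hswp.mp h).2; rw [hms] at this; simpa using this))
          have e2 : PySem.Str.startswith f "rua=" = false :=
            Bool.eq_false_iff.mpr (fun h => hr (by have := (hswr.mp h).2; rw [hms] at this; simpa using this))
          have sa : PySem.Str.startswith f "aspf=" = true :=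
            hswa.mpr ⟨hlen, by rw [hms]; simpa using ha⟩
          rw [e1, e2, sa, hparts, hms, ha]
          have hk : String.ofList ['a','s','p','f'] = "aspf" := by decide
          simp only [Bool.false_eq_true, if_false, if_pos, List.map_cons, List.length_cons,
            List.getD, List.getElem?_cons_zero, List.getElem?_cons_succ, Option.getD_some, hk]
          rw [if_pos (by omega)]
          rw [dictOf_insert t "aspf" _ (by simp [pvKeys])]
        · by_cases hd : h0 = ['a','d','k','i','m']
          · have e1 : PySem.Str.startswith f "p=" = false :=
              Bool.eq_false_iff.mpr (fun h => hp (by have := (hswp.mp h).2; rw [hms] at this; simpa using this))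
            have e2 : PySem.Str.startswith f "rua=" = false :=
              Bool.eq_false_iff.mpr (fun h => hr (by have := (hswr.mp h).2; rw [hms] at this; simpa using this))
            have e3 : PySem.Str.startswith f "aspf=" = false :=
              Bool.eq_false_iff.mpr (fun h => ha (by have := (hswa.mp h).2; rw [hms] at this; simpa using this))
            have sd : PySem.Str.startswith f "adkim=" = true :=
              hswd.mpr ⟨hlen, by rw [hms]; simpa using hd⟩
            rw [e1, e2, e3, sd, hparts, hms, hd]
            have hk : String.ofList ['a','d','k','i','m'] = "adkim" := by decide
            simp only [Bool.false_eq_true, if_false, if_pos, List.map_cons, List.length_cons,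
              List.getD, List.getElem?_cons_zero, List.getElem?_cons_succ, Option.getD_some, hk]
            rw [if_pos (by omega)]
            rw [dictOf_insert t "adkim" _ (by simp [pvKeys])]
          · have e1 : PySem.Str.startswith f "p=" = false :=
              Bool.eq_false_iff.mpr (fun h => hp (by have := (hswp.mp h).2; rw [hms] at this; simpa using this))
            have e2 : PySem.Str.startswith f "rua=" = false :=
              Bool.eq_false_iff.mpr (fun h => hr (by have := (hswr.mp h).2; rw [hms] at this; simpa using this))
            have e3 : PySem.Str.startswith f "aspf=" = false :=
              Bool.eq_false_iff.mpr (fun h => ha (by have := (hswa.mp h).2; rw [hms] at this; simpa using this))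
            have e4 : PySem.Str.startswith f "adkim=" = false :=
              Bool.eq_false_iff.mpr (fun h => hd (by have := (hswd.mp h).2; rw [hms] at this; simpa using this))
            rw [e1, e2, e3, e4, hparts, hms]
            simp only [Bool.false_eq_true, if_false, List.map_cons, List.length_cons,
              List.getD, List.getElem?_cons_zero, List.getElem?_cons_succ, Option.getD_some]
            rw [if_pos (by omega)]
            rw [dictOf_insert_foreign t _ _ (ofList_notin_pvKeys h0 hp hr ha hd)]

lemma fold_inv (fields : List String) (t : PySem.Dict String String) :
    (fields.foldl stepA (dictOf t)).items =
      pvKeys.map (fun k => (k, (fields.foldl stepB t).getD k "N/A")) := by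
  induction fields generalizing t with
  | nil => simp [dictOf]
  | cons f rest ih => simp only [List.foldl_cons, step_comm]; exact ih _

-- ===== VERDICT (by name: the statement is the Claim_ definition above) =====
theorem parse_dmarc_fields_spec : Claim_equal_parse_dmarc_fields := by
  intro r _
  show parse_dmarc_fields r = parse_dmarc_fields_alt r
  have hA : parse_dmarc_fields r
      = ((pySplitBy r ";").foldl stepA (dictOf PySem.Dict.empty)).items := rfl
  have hB : parse_dmarc_fields_alt r
      = pvKeys.map (fun k => (k, ((pySplitBy r ";").foldl stepB PySem.Dict.empty).getD k "N/A")) := rfl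
  rw [hA, hB, fold_inv]
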